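-- pv_equiv track=rewrite | github.com/blimmo/tfp | sat.py | split_nodes
-- ===== SOURCE A (Python) =====
-- def split_nodes(nodes):
--     n = len(nodes)
--     assert n > 0
--     i = 1
--     start = 0
--     while i <= n:
--         if i & n:
--             yield nodes[start:i + start]
--             start = i + start
--         i <<= 1
-- ===== SOURCE B (Python) =====
-- def split_nodes(nodes):
--     n = len(nodes)
--     assert n > 0
--
--     def chunks(end):
--         # chunks of nodes[:end], built back-to-front by peeling the highest power of two
--         if end == 0:
--             return []
--         high = 1 << (end.bit_length() - 1)
--         return chunks(end - high) + [nodes[end - high:end]]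
--
--     yield from chunks(n)
-- ===== Notes on version B (the rewrite author's own statement) =====
-- stated objective: alternative
-- what changed: B replaces A's iterative low-to-high shift-and-test scan (i <<= 1, if i & n, running start offset) with a recursion that peels the HIGHEST power of two via bit_length, builds the chunk list back-to-front (recurse on the prefix, append the top chunk) and yields it; same slices in the same order.
import Mathlib
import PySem

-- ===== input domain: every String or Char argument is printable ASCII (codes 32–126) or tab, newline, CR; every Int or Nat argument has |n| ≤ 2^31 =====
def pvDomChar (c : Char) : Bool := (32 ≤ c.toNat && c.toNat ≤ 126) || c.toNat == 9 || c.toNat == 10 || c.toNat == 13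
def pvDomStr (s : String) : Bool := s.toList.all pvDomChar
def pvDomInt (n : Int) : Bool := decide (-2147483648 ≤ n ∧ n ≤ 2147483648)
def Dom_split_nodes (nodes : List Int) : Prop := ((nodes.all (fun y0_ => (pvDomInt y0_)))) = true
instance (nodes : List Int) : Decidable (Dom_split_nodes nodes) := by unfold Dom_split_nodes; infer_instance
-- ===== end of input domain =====

-- B replaces A's iterative low-to-high shift-and-test scan (i <<= 1, if i & n, running start)
-- by a recursion that peels the HIGHEST power of two of the length via bit_length and builds
-- the chunk list back-to-front (recurse on the prefix, append the top chunk); same slices,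
-- same order (equivalence of return values; both Pythons are generators, compared as lists).


-- ===== PORT A =====
-- A's while-loop over i = 1, 2, 4, … (i <<= 1); i is carried as its exponent k (i = 2^k), and the
-- loop is written with a structural fuel counter (n+1 steps always suffice: the loop stops once
-- 2^k > n); the assert-failing input [] is excluded by Pre_split_nodes.
def splitLoopA (nodes : List Int) (n : Int) (fuel k : Nat) (start : Int) : List (List Int) :=
  match fuel with
  | 0 => []
  | fuel + 1 =>
    if (2 : Int) ^ k ≤ n then
      if PySem.Int.band ((2 : Int) ^ k) n ≠ 0 then
        PySem.List.slice nodes (some start) (some ((2 : Int) ^ k + start)) ::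
          splitLoopA nodes n fuel (k + 1) ((2 : Int) ^ k + start)
      else splitLoopA nodes n fuel (k + 1) start
    else []

def split_nodes (nodes : List Int) : List (List Int) :=
  splitLoopA nodes (nodes.length : Int) (nodes.length + 1) 0 0

-- ===== PORT B =====
-- B's inner recursion chunks(end): chunks of nodes[:end], peeling the highest power of two
-- 2^(end.bit_length()-1); for end > 0, Python's end.bit_length() is Nat.log2 end + 1.
def chunksB (nodes : List Int) (e : Nat) : List (List Int) :=
  if _h : e = 0 then []
  else
    chunksB nodes (e - 2 ^ (Nat.log2 e + 1 - 1)) ++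
      [PySem.List.slice nodes (some ((e - 2 ^ (Nat.log2 e + 1 - 1) : Nat) : Int)) (some ((e : Nat) : Int))]
termination_by e
decreasing_by
  have := Nat.two_pow_pos (Nat.log2 e + 1 - 1); omega

def split_nodes_alt (nodes : List Int) : List (List Int) :=
  chunksB nodes nodes.length

-- ===== PRECONDITION & SPEC =====
-- Pre_ excludes only the empty list, on which Python A (and B alike) raise AssertionError (assert n > 0).
def Pre_split_nodes (nodes : List Int) : Prop := nodes ≠ []
instance (nodes : List Int) : Decidable (Pre_split_nodes nodes) := by unfold Pre_split_nodes; infer_instance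
def pvWitness_split_nodes : List Int := ([1, 2, 3] : List Int)
def Spec_split_nodes (nodes : List Int) (out : List (List Int)) : Prop := out = split_nodes_alt nodes
instance (nodes : List Int) (out : List (List Int)) : Decidable (Spec_split_nodes nodes out) := by unfold Spec_split_nodes; infer_instance

-- ===== CLAIM (what is proved, stated in full; the proofs are below) =====
def Claim_equal_split_nodes : Prop := ∀ (nodes : List Int), Dom_split_nodes nodes → Pre_split_nodes nodes → Spec_split_nodes nodes (split_nodes nodes)

-- ===== LEMMAS AND PROOFS =====

-- reference function: the chunks of nodes determined by the bits of q (low-to-high), current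
-- chunk width i, current offset start
def pvRef (nodes : List Int) (q : Nat) (i start : Int) : List (List Int) :=
  if h : q = 0 then []
  else if q % 2 = 1 then
    PySem.List.slice nodes (some start) (some (start + i)) :: pvRef nodes (q / 2) (2 * i) (start + i)
  else pvRef nodes (q / 2) (2 * i) start
termination_by q
decreasing_by all_goals omega

theorem pvTestBit_mod (n i : Nat) : n.testBit i = decide ((n >>> i) % 2 = 1) := by
  rw [Nat.testBit, Nat.and_comm, Nat.and_one_is_mod]
  rcases Nat.mod_two_eq_zero_or_one (n >>> i) with h | h <;> simp [h]

theorem pvLoopA_ref (nodes : List Int) (n : Int) (hn : 0 ≤ n) :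
    ∀ fuel k start, n.toNat + 1 - 2 ^ k ≤ fuel →
      splitLoopA nodes n fuel k start = pvRef nodes (n.toNat >>> k) ((2 : Int) ^ k) start := by
  intro fuel
  induction fuel with
  | zero =>
      intro k start hd
      have h3 : 1 ≤ 2 ^ k := Nat.one_le_two_pow
      have hq : n.toNat >>> k = 0 := by
        rw [Nat.shiftRight_eq_div_pow]
        exact Nat.div_eq_of_lt (by omega)
      rw [splitLoopA, hq, pvRef, dif_pos rfl]
  | succ d ih =>
      intro k start hd
      have h3 : 1 ≤ 2 ^ k := Nat.one_le_two_pow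
      have h1 : (2 : Int) ^ k = ((2 ^ k : Nat) : Int) := by push_cast; ring
      by_cases hle : (2 : Int) ^ k ≤ n
      · have h2 : 2 ^ k ≤ n.toNat := by rw [h1] at hle; omega
        have hq0 : n.toNat >>> k ≠ 0 := by
          rw [Nat.shiftRight_eq_div_pow]
          have := Nat.one_le_div_iff (Nat.two_pow_pos k) |>.mpr h2
          omega
        have hband : PySem.Int.band ((2 : Int) ^ k) n = ((2 ^ k &&& n.toNat : Nat) : Int) := by
          have hn' : n = ((n.toNat : Nat) : Int) := by omega
          conv_lhs => rw [h1, hn']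
          rw [PySem.Int.band_natCast]
        have htb : (2 ^ k &&& n.toNat : Nat) = 2 ^ k * (n.toNat.testBit k).toNat :=
          Nat.two_pow_and n.toNat k
        have hdiv : n.toNat >>> k / 2 = n.toNat >>> (k + 1) := (Nat.shiftRight_succ n.toNat k).symm
        have hmeas : n.toNat + 1 - 2 ^ (k + 1) ≤ d := by
          have h4 : 2 ^ (k + 1) = 2 * 2 ^ k := by ring
          omega
        have hpow : 2 * (2 : Int) ^ k = (2 : Int) ^ (k + 1) := by ring
        rw [splitLoopA, if_pos hle]
        by_cases hbit : n.toNat.testBit k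
        · have hodd : (n.toNat >>> k) % 2 = 1 := by
            have h := pvTestBit_mod n.toNat k
            rw [hbit] at h
            exact of_decide_eq_true h.symm
          have hne : PySem.Int.band ((2 : Int) ^ k) n ≠ 0 := by
            rw [hband, htb, hbit]
            simp only [Bool.toNat_true, mul_one]
            intro hcon
            have hcon' : (2 ^ k : Nat) = 0 := by exact_mod_cast hcon
            have := Nat.two_pow_pos k
            omega
          rw [if_pos hne]
          conv_rhs => rw [pvRef]
          rw [dif_neg hq0, if_pos hodd, hdiv]
          rw [ih (k + 1) ((2 : Int) ^ k + start) hmeas]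
          rw [hpow, add_comm start ((2 : Int) ^ k)]
        · have hb' : n.toNat.testBit k = false := by simpa using hbit
          have heven : ¬ ((n.toNat >>> k) % 2 = 1) := by
            have h := pvTestBit_mod n.toNat k
            rw [hb'] at h
            intro hc
            simp [hc] at h
          have heq : PySem.Int.band ((2 : Int) ^ k) n = 0 := by
            rw [hband, htb, hb']
            simp
          rw [if_neg (by simp [heq])]
          conv_rhs => rw [pvRef]
          rw [dif_neg hq0, if_neg heven, hdiv]
          rw [ih (k + 1) start hmeas, hpow]
      · have h2 : ¬ (2 ^ k ≤ n.toNat) := by rw [h1] at hle; omega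
        have hq : n.toNat >>> k = 0 := by
          rw [Nat.shiftRight_eq_div_pow]
          exact Nat.div_eq_of_lt (by omega)
        rw [splitLoopA, if_neg hle, hq, pvRef, dif_pos rfl]

theorem pvLog2_eq (L m : Nat) (h1 : 2 ^ L ≤ m) (h2 : m < 2 ^ (L + 1)) : Nat.log2 m = L := by
  rw [Nat.log2_eq_log_two]
  exact Nat.log_eq_of_pow_le_of_lt_pow h1 h2

-- a run of pvRef over a pure power of two is a single chunk
theorem pvRef_pow (nodes : List Int) :
    ∀ L (i start : Int),
      pvRef nodes (2 ^ L) i start =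
        [PySem.List.slice nodes (some start) (some (start + ((2 ^ L : Nat) : Int) * i))] := by
  intro L
  induction L with
  | zero =>
      intro i start
      rw [pvRef]
      norm_num
      rw [pvRef, dif_pos rfl]
  | succ L ih =>
      intro i start
      have he : 2 ^ (L + 1) = 2 * 2 ^ L := by ring
      have h0 : 2 ^ (L + 1) ≠ 0 := by positivity
      have hodd : ¬ (2 ^ (L + 1) % 2 = 1) := by omega
      have hdiv : 2 ^ (L + 1) / 2 = 2 ^ L := by omega
      rw [pvRef, dif_neg h0, if_neg hodd, hdiv, ih]
      congr 2
      push_cast [he]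
      ring

-- the key structural fact: pvRef splits as "all lower bits, then the top chunk"
theorem pvRef_high (nodes : List Int) :
    ∀ q (i start : Int), q ≠ 0 →
      pvRef nodes q i start =
        pvRef nodes (q - 2 ^ Nat.log2 q) i start ++
          [PySem.List.slice nodes
            (some (start + ((q - 2 ^ Nat.log2 q : Nat) : Int) * i))
            (some (start + ((q : Nat) : Int) * i))] := by
  intro q
  induction q using Nat.strong_induction_on with
  | _ q ih =>
      intro i start hq
      have hL1 : 2 ^ Nat.log2 q ≤ q := Nat.log2_self_le hq
      have hL2 : q < 2 ^ (Nat.log2 q + 1) := Nat.lt_log2_self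
      by_cases hr : q - 2 ^ Nat.log2 q = 0
      · -- q is exactly a power of two
        have hq2 : q = 2 ^ Nat.log2 q := by omega
        have hc : ((q : Nat) : Int) = ((2 ^ Nat.log2 q : Nat) : Int) := by exact_mod_cast hq2
        rw [hr]
        conv_lhs => rw [hq2, pvRef_pow]
        rw [pvRef, dif_pos rfl, hc]
        simp
      · -- q has lower bits too; then log2 q ≥ 1
        have hL0 : Nat.log2 q ≠ 0 := by
          intro h
          rw [h] at hL1 hL2 hr
          norm_num at hL1 hL2 hr
          omega
        obtain ⟨L', hL'⟩ : ∃ L', Nat.log2 q = L' + 1 := ⟨Nat.log2 q - 1, by omega⟩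
        rw [hL'] at hL1 hL2 hr ⊢
        have e1 : 2 ^ (L' + 1) = 2 * 2 ^ L' := by ring
        have e2 : 2 ^ (L' + 1 + 1) = 2 * 2 ^ (L' + 1) := by ring
        have hq2 : q / 2 ≠ 0 := by omega
        have hqlt : q / 2 < q := Nat.div_lt_self (by omega) (by omega)
        have hlog : Nat.log2 (q / 2) = L' := pvLog2_eq L' (q / 2) (by omega) (by omega)
        have hsub : q / 2 - 2 ^ L' = (q - 2 ^ (L' + 1)) / 2 := by omega
        have hih := ih (q / 2) hqlt (2 * i) (start + i)
        have hih' := ih (q / 2) hqlt (2 * i) start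
        by_cases hodd : q % 2 = 1
        · have hrodd : (q - 2 ^ (L' + 1)) % 2 = 1 := by omega
          have hcr : ((q - 2 ^ (L' + 1) : Nat) : Int) = 2 * (((q - 2 ^ (L' + 1)) / 2 : Nat) : Int) + 1 := by omega
          have hcq : ((q : Nat) : Int) = 2 * ((q / 2 : Nat) : Int) + 1 := by omega
          have ha : start + i + (((q - 2 ^ (L' + 1)) / 2 : Nat) : Int) * (2 * i)
              = start + ((q - 2 ^ (L' + 1) : Nat) : Int) * i := by rw [hcr]; ring
          have hb : start + i + ((q / 2 : Nat) : Int) * (2 * i) = start + ((q : Nat) : Int) * i := by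
            rw [hcq]; ring
          conv_lhs => rw [pvRef]
          rw [dif_neg hq, if_pos hodd, hih hq2, hlog, hsub, ha, hb]
          conv_rhs => rw [pvRef]
          rw [dif_neg hr, if_pos hrodd, List.cons_append]
        · have hreven : ¬ ((q - 2 ^ (L' + 1)) % 2 = 1) := by omega
          have hcr : ((q - 2 ^ (L' + 1) : Nat) : Int) = 2 * (((q - 2 ^ (L' + 1)) / 2 : Nat) : Int) := by omega
          have hcq : ((q : Nat) : Int) = 2 * ((q / 2 : Nat) : Int) := by omega
          have ha : start + (((q - 2 ^ (L' + 1)) / 2 : Nat) : Int) * (2 * i)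
              = start + ((q - 2 ^ (L' + 1) : Nat) : Int) * i := by rw [hcr]; ring
          have hb : start + ((q / 2 : Nat) : Int) * (2 * i) = start + ((q : Nat) : Int) * i := by
            rw [hcq]; ring
          conv_lhs => rw [pvRef]
          rw [dif_neg hq, if_neg hodd, hih' hq2, hlog, hsub, ha, hb]
          conv_rhs => rw [pvRef]
          rw [dif_neg hr, if_neg hreven]

-- pvRef with unit width from offset 0 is exactly B's chunks
theorem pvChunks_eq (nodes : List Int) : ∀ e, pvRef nodes e 1 0 = chunksB nodes e := by
  intro e
  induction e using Nat.strong_induction_on with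
  | _ e ih =>
      by_cases he : e = 0
      · rw [he, pvRef, dif_pos rfl, chunksB, dif_pos rfl]
      · have hlt : e - 2 ^ Nat.log2 e < e := by
          have := Nat.two_pow_pos (Nat.log2 e); omega
        rw [pvRef_high nodes e 1 0 he, ih _ hlt]
        conv_rhs => rw [chunksB]
        rw [dif_neg he]
        simp

-- ===== VERDICT (by name: the statement is the Claim_ definition above) =====
theorem split_nodes_spec : Claim_equal_split_nodes := by
  intro nodes _ _
  unfold Spec_split_nodes split_nodes split_nodes_alt
  rw [pvLoopA_ref nodes (nodes.length : Int) (by positivity) (nodes.length + 1) 0 0 (by simp)]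
  simp only [Nat.shiftRight_zero, Int.toNat_natCast, pow_zero]
  exact pvChunks_eq nodes nodes.length
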